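-- pv_equiv track=rewrite | github.com/MuhammadTausif/code-signal | arcade/1. Intro (60)/7. Through the Fog (4-3)/33- stringsRearrangement.py | isChainPossible
-- ===== SOURCE A (Python) =====
-- def isChainPossible(startIndex, array):
--     if len(array) == 1:
--         return True
--     newArray = array[:startIndex] + array[(1 + startIndex):]
--     for i in range(len(newArray)):
--         if differsByOne(array[startIndex], newArray[i]) and \
--            isChainPossible(i, newArray):
--             return True
--     return False
--
-- def differsByOne(s1, s2):
--     if len(s1) != len(s2):
--         return False
--     differentChars = 0
--     for i in range(len(s1)):
--         if s1[i] != s2[i]: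
--             differentChars += 1
--     return differentChars == 1
-- ===== SOURCE B (Python) =====
-- def isChainPossible(startIndex, array):
--     # Iterative search: an explicit LIFO worklist of (index, remaining-list)
--     # frames replaces A's self-recursion.
--     stack = [(startIndex, array)]
--     while stack:
--         s, arr = stack.pop()
--         if len(arr) == 1:
--             return True
--         rest = arr[:s] + arr[s + 1:]
--         for i in range(len(rest)):
--             if differsByOne(arr[s], rest[i]):
--                 stack.append((i, rest))
--     return False
--
-- def differsByOne(s1, s2):
--     return len(s1) == len(s2) and sum(c != d for c, d in zip(s1, s2)) == 1
-- ===== Notes on version B (the rewrite author's own statement) =====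
-- stated objective: alternative
-- what changed: the n-deep self-recursion is replaced by a single iterative loop over an explicit LIFO worklist of (index, remaining-list) frames, and the character-difference count is computed by a zip/sum one-liner instead of an index loop
import Mathlib
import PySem

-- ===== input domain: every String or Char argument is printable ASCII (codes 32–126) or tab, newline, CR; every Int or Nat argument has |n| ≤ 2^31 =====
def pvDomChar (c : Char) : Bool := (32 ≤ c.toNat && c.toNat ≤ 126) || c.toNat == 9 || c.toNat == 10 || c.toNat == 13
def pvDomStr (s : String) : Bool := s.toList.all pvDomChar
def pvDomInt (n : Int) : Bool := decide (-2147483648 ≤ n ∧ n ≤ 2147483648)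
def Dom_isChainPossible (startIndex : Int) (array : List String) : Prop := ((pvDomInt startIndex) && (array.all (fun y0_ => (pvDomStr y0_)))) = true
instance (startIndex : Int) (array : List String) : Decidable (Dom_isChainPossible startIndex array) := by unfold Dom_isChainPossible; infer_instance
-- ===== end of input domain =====

-- B re-implements A's recursive backtracking as an iterative loop over an explicit LIFO
-- worklist of (index, remaining-list) frames (objective: alternative decomposition, same cost).

-- ===== PORT A =====

def differsByOne (s1 s2 : String) : Bool :=
  if PySem.Str.len s1 ≠ PySem.Str.len s2 then false
  else
    ((PySem.List.pyRange 0 (PySem.Str.len s1) 1).foldl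
      (fun acc i => if PySem.Str.pyGet? s1 i ≠ PySem.Str.pyGet? s2 i then acc + 1 else acc)
      (0 : Int)) == 1

-- used by the ports' termination proofs: the remaining list after removing index s is short
lemma pvSliceBound (xs : List String) (s t : Int) (ht : t = 1 + s)
    (hlo : -(xs.length : Int) ≤ s) (hhi : s < (xs.length : Int)) :
    (PySem.List.slice xs none (some s) ++ PySem.List.slice xs (some t) none).length ≤
      (if s < 0 then 2 * xs.length - 1 else xs.length - 1) := by
  rw [List.length_append]
  by_cases hs : 0 ≤ s
  · rw [PySem.List.slice_to xs hs, PySem.List.slice_from xs (by omega : (0:Int) ≤ t)]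
    rw [List.length_take, List.length_drop]
    simp only [if_neg (by omega : ¬ s < 0)]
    omega
  · rw [show s = -(((-s).toNat : Nat) : Int) by omega] at hlo hhi ⊢
    rw [PySem.List.slice_to_neg_natCast xs (-s).toNat (by omega),
        PySem.List.slice_some_none]
    rw [List.length_take, List.length_drop]
    simp only [if_pos (by omega : -(((-s).toNat : Nat) : Int) < 0)]
    omega

def isChainPossible (startIndex : Int) (array : List String) : Bool :=
  if array.length == 1 then true
  else
    let newArray := PySem.List.slice array none (some startIndex) ++
                    PySem.List.slice array (some (1 + startIndex)) none
    match h : PySem.List.pyGet? array startIndex with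
    | none => false   -- Python raises IndexError here whenever the loop runs; Pre_ excludes this
    | some x =>
      (List.range newArray.length).attach.any (fun i =>
        differsByOne x (newArray.getD i.1 "") && isChainPossible (i.1 : Int) newArray)
termination_by (if startIndex < 0 then 4 * array.length else 2 * array.length)
decreasing_by
  have hin : PySem.Raise.InRange array.length startIndex := by
    by_contra hc
    rw [← PySem.List.pyGet?_eq_none_iff] at hc
    simp [hc] at h
  obtain ⟨hlo, hhi⟩ := hin
  have hb := pvSliceBound array startIndex (1 + startIndex) rfl hlo hhi
  have hn : 1 ≤ array.length := by omega
  have hi0 : ¬ (((i.1 : Nat) : Int) < 0) := by omega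
  rw [if_neg hi0]
  by_cases hs : startIndex < 0
  · rw [if_pos hs] at hb ⊢; omega
  · rw [if_neg hs] at hb ⊢; omega

-- ===== PORT B =====

def diffB (s1 s2 : String) : Bool :=
  (PySem.Str.len s1 == PySem.Str.len s2) &&
    (((s1.toList.zip s2.toList).foldl
        (fun acc cd => acc + (if cd.1 ≠ cd.2 then (1 : Int) else 0)) 0) == 1)

def pvWeight (p : Int × List String) : Nat :=
  (if p.1 < 0 then 4 * p.2.length else 2 * p.2.length).factorial

-- used by bLoop's termination proof
lemma pvFactBound (r m : Nat) (h : 2 * r + 1 ≤ m) : r * (2 * r).factorial < m.factorial := by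
  calc r * (2 * r).factorial < (2 * r + 1) * (2 * r).factorial :=
        Nat.mul_lt_mul_of_pos_right (by omega) (Nat.factorial_pos _)
    _ = (2 * r + 1).factorial := (Nat.factorial_succ _).symm
    _ ≤ m.factorial := Nat.factorial_le h

-- used by bLoop's termination proof: the pushed frames weigh less than the popped frame
lemma pvFramesBound (s : Int) (arr : List String) (r : Nat) (F : List (Int × List String))
    (hn : 1 ≤ arr.length)
    (hr : r ≤ if s < 0 then 2 * arr.length - 1 else arr.length - 1)
    (hFlen : F.length ≤ r)
    (hFmem : ∀ w ∈ F.map pvWeight, w ≤ (2 * r).factorial) :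
    (F.map pvWeight).sum < pvWeight (s, arr) := by
  have hsum := List.sum_le_card_nsmul (F.map pvWeight) ((2 * r).factorial) hFmem
  rw [List.length_map, smul_eq_mul] at hsum
  have h2 : F.length * (2 * r).factorial ≤ r * (2 * r).factorial :=
    Nat.mul_le_mul_right _ hFlen
  simp only [pvWeight]
  refine lt_of_le_of_lt (le_trans hsum h2) (pvFactBound r _ ?_)
  by_cases hs : s < 0
  · rw [if_pos hs] at hr ⊢; omega
  · rw [if_neg hs] at hr ⊢; omega

def bLoop : List (Int × List String) → Bool
  | [] => false
  | (s, arr) :: stackRest =>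
    if arr.length == 1 then true
    else
      let rest := PySem.List.slice arr none (some s) ++
                  PySem.List.slice arr (some (s + 1)) none
      match h : PySem.List.pyGet? arr s with
      | none => if rest.length == 0 then bLoop stackRest else false
                -- Python raises IndexError (arr[s]) when the loop runs; Pre_ excludes this
      | some x =>
        let frames := (List.range rest.length).filterMap (fun i =>
          if diffB x (rest.getD i "") then some ((i : Int), rest) else none)
        bLoop (frames.reverse ++ stackRest)
termination_by stack => (stack.map pvWeight).sum
decreasing_by
  · simp only [List.map_cons, List.sum_cons]
    have hp : 0 < pvWeight (s, arr) := Nat.factorial_pos _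
    omega
  · have hin : PySem.Raise.InRange arr.length s := by
      by_contra hc
      rw [← PySem.List.pyGet?_eq_none_iff] at hc
      simp [hc] at h
    obtain ⟨hlo, hhi⟩ := hin
    have hn : 1 ≤ arr.length := by omega
    have hb := pvSliceBound arr s (s + 1) (by omega) hlo hhi
    simp only [List.map_append, List.sum_append, List.map_reverse, List.sum_reverse,
               List.map_cons, List.sum_cons]
    refine Nat.add_lt_add_right ?_ _
    refine pvFramesBound s arr _ _ hn hb
      (le_trans (List.length_filterMap_le _ _) (Nat.le_of_eq List.length_range)) ?_
    intro w hw
    obtain ⟨p, hp, rfl⟩ := List.mem_map.mp hw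
    obtain ⟨i, hi, hif⟩ := List.mem_filterMap.mp hp
    split at hif
    · cases hif
      simp only [pvWeight, if_neg (by omega : ¬ ((i : Nat) : Int) < 0)]
      exact le_refl _
    · cases hif

def isChainPossible_alt (startIndex : Int) (array : List String) : Bool :=
  bLoop [(startIndex, array)]

-- ===== PRECONDITION & SPEC =====
-- Pre_ excludes exactly the inputs on which A raises IndexError: an array of length ≥ 2
-- together with a start index outside [-len(array), len(array)).
def Pre_isChainPossible (startIndex : Int) (array : List String) : Prop :=
  array.length ≤ 1 ∨ (-(array.length : Int) ≤ startIndex ∧ startIndex < (array.length : Int))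
instance (startIndex : Int) (array : List String) : Decidable (Pre_isChainPossible startIndex array) := by unfold Pre_isChainPossible; infer_instance

def pvWitness_isChainPossible : Int × List String := (0, ["ab", "bb"])

def Spec_isChainPossible (startIndex : Int) (array : List String) (out : Bool) : Prop := out = isChainPossible_alt startIndex array
instance (startIndex : Int) (array : List String) (out : Bool) : Decidable (Spec_isChainPossible startIndex array out) := by unfold Spec_isChainPossible; infer_instance

-- ===== CLAIM (what is proved, stated in full; the proofs are below) =====
def Claim_equal_isChainPossible : Prop := ∀ (startIndex : Int) (array : List String), Dom_isChainPossible startIndex array → Pre_isChainPossible startIndex array → Spec_isChainPossible startIndex array (isChainPossible startIndex array)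

-- ===== LEMMAS AND PROOFS =====

lemma pvFoldAux (l1 l2 : List Char) (acc : Int) (h : l1.length = l2.length) :
    (List.range l1.length).foldl (fun a k => if l1[k]? ≠ l2[k]? then a + 1 else a) acc
      = (l1.zip l2).foldl (fun a cd => a + (if cd.1 ≠ cd.2 then (1:Int) else 0)) acc := by
  induction l1 generalizing l2 acc with
  | nil => cases l2 with
    | nil => rfl
    | cons y t2 => simp at h
  | cons x t1 ih =>
    cases l2 with
    | nil => simp at h
    | cons y t2 =>
      simp only [List.length_cons, List.range_succ_eq_map, List.foldl_cons, List.foldl_map,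
                 List.zip_cons_cons]
      simp only [List.length_cons, List.getElem?_cons_zero, List.getElem?_cons_succ] at *
      refine Eq.trans (ih t2 (if some x ≠ some y then acc + 1 else acc) (by omega)) ?_
      congr 1
      by_cases hxy : x = y <;> simp [hxy]

lemma pvHelperEq (s1 s2 : String) : diffB s1 s2 = differsByOne s1 s2 := by
  unfold diffB differsByOne
  by_cases h : s1.toList.length = s2.toList.length
  · rw [if_neg (by simp [PySem.Str.len_eq, ← String.length_toList, h])]
    have hA : (PySem.List.pyRange 0 (PySem.Str.len s1) 1).foldl
        (fun acc i => if PySem.Str.pyGet? s1 i ≠ PySem.Str.pyGet? s2 i then acc + 1 else acc) (0:Int)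
        = (s1.toList.zip s2.toList).foldl (fun a cd => a + (if cd.1 ≠ cd.2 then (1:Int) else 0)) 0 := by
      rw [PySem.Str.len_eq, PySem.List.pyRange_one]
      simp only [Int.sub_zero, Int.toNat_natCast, List.foldl_map, zero_add, PySem.Str.pyGet?_natCast]
      exact pvFoldAux s1.toList s2.toList 0 h
    rw [hA]
    simp [PySem.Str.len_eq, ← String.length_toList, h]
  · rw [if_pos (by simp [PySem.Str.len_eq, ← String.length_toList, h])]
    simp [PySem.Str.len_eq, ← String.length_toList, h]

lemma pvFilterMapAny {a b : Type} (l : List a) (p : a → Bool) (g : a → b) (q : b → Bool) :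
    (l.filterMap (fun i => if p i then some (g i) else none)).any q
      = l.any (fun i => p i && q (g i)) := by
  induction l with
  | nil => rfl
  | cons x t ih => by_cases hp : p x <;> simp [hp, ih]

lemma pvSliceNilTo (s : Int) : PySem.List.slice ([] : List String) none (some s) = [] := by
  simp [PySem.List.slice]

lemma pvSliceNilFrom (t : Int) : PySem.List.slice ([] : List String) (some t) none = [] := by
  simp [PySem.List.slice]

lemma pvGetNil (s : Int) : PySem.List.pyGet? ([] : List String) s = none := by
  rw [PySem.List.pyGet?_eq_none_iff]
  simp [PySem.Raise.InRange]

lemma pvANil (s : Int) : isChainPossible s [] = false := by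
  rw [isChainPossible.eq_def, if_neg (by simp)]
  split
  · rfl
  · next y heq => rw [pvGetNil] at heq; cases heq

lemma pvBLoopConsNil (s : Int) (st : List (Int × List String)) :
    bLoop ((s, []) :: st) = bLoop st := by
  rw [bLoop, if_neg (by simp)]
  split
  · next heq => rw [if_pos (by simp [pvSliceNilTo, pvSliceNilFrom])]
  · next y heq => rw [pvGetNil] at heq; cases heq

lemma pvBLoopEq (stack : List (Int × List String))
    (hok : ∀ p ∈ stack, Pre_isChainPossible p.1 p.2) :
    bLoop stack = stack.any (fun p => isChainPossible p.1 p.2) := by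
  induction stack using bLoop.induct with
  | case1 => rw [bLoop]; rfl
  | case2 s arr stackRest h1 =>
    rw [bLoop.eq_def]
    simp only [h1, if_pos, List.any_cons]
    rw [isChainPossible.eq_def]
    simp [h1]
  | case3 s arr stackRest h1 rest hnone hempty ih =>
    have hpre : Pre_isChainPossible s arr := hok (s, arr) List.mem_cons_self
    have harr : arr = [] := by
      rcases hpre with hle | hin
      · have : ¬ (arr.length == 1) = true := h1
        simp only [beq_iff_eq] at this
        exact List.eq_nil_of_length_eq_zero (by omega)
      · exact absurd hnone (by rw [PySem.List.pyGet?_eq_none_iff]; simp; exact hin)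
    subst harr
    rw [pvBLoopConsNil, ih (fun p hp => hok p (List.mem_cons_of_mem _ hp)),
        List.any_cons, pvANil]
    simp
  | case4 s arr stackRest h1 rest hnone hempty =>
    exfalso
    have hpre : Pre_isChainPossible s arr := hok (s, arr) List.mem_cons_self
    have harr : arr = [] := by
      rcases hpre with hle | hin
      · have : ¬ (arr.length == 1) = true := h1
        simp only [beq_iff_eq] at this
        exact List.eq_nil_of_length_eq_zero (by omega)
      · exact absurd hnone (by rw [PySem.List.pyGet?_eq_none_iff]; simp; exact hin)
    subst harr
    exact hempty (by
      show ((PySem.List.slice ([] : List String) none (some s) ++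
             PySem.List.slice ([] : List String) (some (s + 1)) none).length == 0) = true
      simp [pvSliceNilTo, pvSliceNilFrom])
  | case5 s arr stackRest h1 rest x hsome frames ih =>
    rw [bLoop, if_neg h1]
    split
    · next heq => rw [hsome] at heq; cases heq
    · next y heq =>
      rw [hsome] at heq
      injection heq with heq
      subst heq
      have hokF : ∀ p ∈ frames.reverse ++ stackRest, Pre_isChainPossible p.1 p.2 := by
        intro p hp
        rcases List.mem_append.mp hp with hpf | hps
        · rw [List.mem_reverse] at hpf
          obtain ⟨i, hi, hif⟩ := List.mem_filterMap.mp hpf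
          rw [List.mem_range] at hi
          split at hif
          · cases hif
            show Pre_isChainPossible (i : Int) rest
            right
            constructor
            · have : (0:Int) ≤ (i : Int) := Int.natCast_nonneg i
              omega
            · exact_mod_cast hi
          · cases hif
        · exact hok p (List.mem_cons_of_mem _ hps)
      refine Eq.trans (ih hokF) ?_
      rw [List.any_append, List.any_reverse, List.any_cons]
      congr 1
      show (List.filterMap
              (fun i => if diffB x (rest.getD i "") = true then some ((i : Int), rest) else none)
              (List.range rest.length)).any (fun p => isChainPossible p.1 p.2)
            = isChainPossible s arr
      rw [pvFilterMapAny]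
      rw [isChainPossible.eq_def, if_neg h1]
      split
      · next heq => rw [hsome] at heq; cases heq
      · next y heq =>
        rw [hsome] at heq
        injection heq with heq
        subst heq
        rw [show (1 : Int) + s = s + 1 from add_comm 1 s]
        show ((List.range rest.length).any fun i => diffB x (rest.getD i "") && isChainPossible ((i:Int), rest).1 ((i:Int), rest).2)
              = (List.range rest.length).attach.any fun i => differsByOne x (rest.getD (↑i) "") && isChainPossible (↑↑i) rest
        simp only [List.any_subtype, List.unattach_attach, pvHelperEq]

-- ===== VERDICT (by name: the statement is the Claim_ definition above) =====
theorem isChainPossible_spec : Claim_equal_isChainPossible := by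
  intro s arr _ hpre
  unfold Spec_isChainPossible isChainPossible_alt
  rw [pvBLoopEq [(s, arr)] (by intro p hp; rw [List.mem_singleton] at hp; subst hp; exact hpre)]
  simp
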